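-- pv_equiv track=rewrite | github.com/pypi-data/pypi-mirror-358 | packages/tumee-codeguard/tumee_codeguard-0.26.0.tar.gz/tumee_codeguard-0.26.0/src/servers/llm_proxy/simple_llm_plugin.py | _looks_like_llm_response
-- ===== SOURCE A (Python) =====
-- def _looks_like_llm_response(text: str) -> bool:
--     """Check if text looks like an LLM API response."""
--     try:
--         text_lower = text.lower()
--         llm_response_patterns = [
--             "choices",
--             "content",
--             "anthropic",
--             "openai",
--             "completion",
--             "message",
--             "role",
--             "assistant",
--             "model",
--             "usage",
--         ]
--         return any(pattern in text_lower for pattern in llm_response_patterns)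
--     except Exception:
--         return False
-- ===== SOURCE B (Python) =====
-- # Patterns indexed by their first character: at each position we only test the
-- # few keywords that could possibly start there, instead of ten full substring
-- # scans over the text.
-- _BY_FIRST = {
--     "a": ("anthropic", "assistant"),
--     "c": ("choices", "content", "completion"),
--     "m": ("message", "model"),
--     "o": ("openai",),
--     "r": ("role",),
--     "u": ("usage",),
-- }
--
--
-- def _looks_like_llm_response(text: str) -> bool:
--     """Check if text looks like an LLM API response."""
--     try:
--         low = text.lower()
--         i = 0
--         n = len(low)
--         while i < n:
--             for p in _BY_FIRST.get(low[i], ()):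
--                 if low.startswith(p, i):
--                     return True
--             i += 1
--         return False
--     except Exception:
--         return False
-- ===== Notes on version B (the rewrite author's own statement) =====
-- stated objective: alternative
-- what changed: Replaces ten independent whole-text substring searches with one left-to-right position scan driven by a dict indexing the keywords by first character, so at each position only the (at most 3) keywords that could start there are tested with startswith.
import Mathlib
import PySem

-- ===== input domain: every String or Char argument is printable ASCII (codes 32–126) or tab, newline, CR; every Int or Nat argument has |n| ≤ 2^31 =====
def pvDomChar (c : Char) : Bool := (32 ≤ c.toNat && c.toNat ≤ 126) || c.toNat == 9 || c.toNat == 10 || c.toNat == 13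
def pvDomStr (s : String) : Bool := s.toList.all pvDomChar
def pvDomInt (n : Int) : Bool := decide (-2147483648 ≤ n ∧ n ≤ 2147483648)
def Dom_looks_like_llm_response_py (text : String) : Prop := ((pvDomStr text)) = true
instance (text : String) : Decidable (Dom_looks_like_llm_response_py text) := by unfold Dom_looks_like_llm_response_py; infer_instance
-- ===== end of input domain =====

-- B replaces ten whole-text substring searches with one position scan that, at each
-- position, tests only the keywords indexed by the current character in a dict keyed
-- by first letter (objective: alternative). A's try/except can never fire for a str.


-- ===== PORT A =====
-- A's local pattern list; the try/except cannot fire for a genuine str input.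
def llmPatternsA : List String :=
  ["choices", "content", "anthropic", "openai", "completion",
   "message", "role", "assistant", "model", "usage"]

def looks_like_llm_response_py (text : String) : Bool :=
  let text_lower := PySem.Str.lower text
  llmPatternsA.any (fun pattern => PySem.Str.isIn pattern text_lower)

-- ===== PORT B =====
-- B's module-level dict literal _BY_FIRST (keys are the 1-char strings, here Char).
def llmByFirst : PySem.Dict Char (List String) :=
  PySem.Dict.ofList
    [('a', ["anthropic", "assistant"]),
     ('c', ["choices", "content", "completion"]),
     ('m', ["message", "model"]),
     ('o', ["openai"]),
     ('r', ["role"]),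
     ('u', ["usage"])]

-- the while-loop over positions: the remaining suffix c :: cs is the text from
-- position i on; low[i] is c, low.startswith(p, i) is startswith (c :: cs) p;
-- the early `return True` becomes ||.
def llmScan : List Char → Bool
  | [] => false
  | c :: cs =>
    ((PySem.Dict.getD llmByFirst c []).any
        (fun p => PySem.Chars.startswith (c :: cs) p.toList))
      || llmScan cs

def looks_like_llm_response_py_alt (text : String) : Bool :=
  llmScan (PySem.Str.lower text).toList

-- ===== PRECONDITION & SPEC =====
def Spec_looks_like_llm_response_py (text : String) (out : Bool) : Prop := out = looks_like_llm_response_py_alt text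
instance (text : String) (out : Bool) : Decidable (Spec_looks_like_llm_response_py text out) := by unfold Spec_looks_like_llm_response_py; infer_instance

-- ===== CLAIM (what is proved, stated in full; the proofs are below) =====
def Claim_equal_looks_like_llm_response_py : Prop := ∀ (text : String), Dom_looks_like_llm_response_py text → Spec_looks_like_llm_response_py text (looks_like_llm_response_py text)

-- ===== LEMMAS AND PROOFS =====

-- the dict literal as a plain association list
lemma llmByFirst_mk :
    llmByFirst = PySem.Dict.mk
      [('a', ["anthropic", "assistant"]),
       ('c', ["choices", "content", "completion"]),
       ('m', ["message", "model"]),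
       ('o', ["openai"]),
       ('r', ["role"]),
       ('u', ["usage"])] := by decide

-- dispatch: at the head of a suffix, testing only the first-letter bucket tests
-- exactly the patterns that can match there
lemma llmDispatch (c : Char) (cs : List Char) :
    ((PySem.Dict.getD llmByFirst c []).any
        (fun p => PySem.Chars.startswith (c :: cs) p.toList))
      = llmPatternsA.any (fun p => PySem.Chars.startswith (c :: cs) p.toList) := by
  by_cases h1 : c = 'a'
  · subst h1
    rw [show PySem.Dict.getD llmByFirst 'a' [] = ["anthropic", "assistant"] by decide]
    simp [llmPatternsA, PySem.Chars.startswith, List.isPrefixOf]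
  · by_cases h2 : c = 'c'
    · subst h2
      rw [show PySem.Dict.getD llmByFirst 'c' [] = ["choices", "content", "completion"] by decide]
      simp [llmPatternsA, PySem.Chars.startswith, List.isPrefixOf]
    · by_cases h3 : c = 'm'
      · subst h3
        rw [show PySem.Dict.getD llmByFirst 'm' [] = ["message", "model"] by decide]
        simp [llmPatternsA, PySem.Chars.startswith, List.isPrefixOf]
      · by_cases h4 : c = 'o'
        · subst h4
          rw [show PySem.Dict.getD llmByFirst 'o' [] = ["openai"] by decide]
          simp [llmPatternsA, PySem.Chars.startswith, List.isPrefixOf]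
        · by_cases h5 : c = 'r'
          · subst h5
            rw [show PySem.Dict.getD llmByFirst 'r' [] = ["role"] by decide]
            simp [llmPatternsA, PySem.Chars.startswith, List.isPrefixOf]
          · by_cases h6 : c = 'u'
            · subst h6
              rw [show PySem.Dict.getD llmByFirst 'u' [] = ["usage"] by decide]
              simp [llmPatternsA, PySem.Chars.startswith, List.isPrefixOf]
            · rw [show PySem.Dict.getD llmByFirst c [] = [] by
                simp [llmByFirst_mk, PySem.Dict.getD_eq_get?_getD, PySem.Dict.get?, Ne.symm h1, Ne.symm h2, Ne.symm h3, Ne.symm h4,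
                      Ne.symm h5, Ne.symm h6]]
              simp [llmPatternsA, PySem.Chars.startswith, List.isPrefixOf,
                    Ne.symm h1, Ne.symm h2, Ne.symm h3, Ne.symm h4, Ne.symm h5, Ne.symm h6]

-- 'p in (c :: cs)' splits into 'match at the head' or 'p in cs'
lemma isIn_cons (p : List Char) (c : Char) (cs : List Char) :
    PySem.Chars.isIn p (c :: cs)
      = (PySem.Chars.startswith (c :: cs) p || PySem.Chars.isIn p cs) := by
  rw [Bool.eq_iff_iff]
  simp [PySem.Chars.isIn_iff_infix, List.infix_cons_iff, PySem.Chars.startswith_iff]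

-- the position scan computes exactly 'some pattern is a substring'
lemma llmScan_eq (s : List Char) :
    llmScan s = llmPatternsA.any (fun p => PySem.Chars.isIn p.toList s) := by
  induction s with
  | nil => decide
  | cons c cs ih =>
    rw [llmScan, llmDispatch c cs, ih, Bool.eq_iff_iff]
    simp only [Bool.or_eq_true, List.any_eq_true, isIn_cons]
    constructor
    · rintro (⟨p, hp, hsw⟩ | ⟨p, hp, hin⟩)
      · exact ⟨p, hp, by simp [hsw]⟩
      · exact ⟨p, hp, by simp [hin]⟩
    · rintro ⟨p, hp, h⟩
      rcases h with hsw | hin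
      · exact Or.inl ⟨p, hp, hsw⟩
      · exact Or.inr ⟨p, hp, hin⟩

-- ===== VERDICT (by name: the statement is the Claim_ definition above) =====
theorem looks_like_llm_response_py_spec : Claim_equal_looks_like_llm_response_py := by
  intro text _
  unfold Spec_looks_like_llm_response_py
  unfold looks_like_llm_response_py looks_like_llm_response_py_alt
  rw [llmScan_eq]
  simp [PySem.Str.isIn_eq]
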